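-- pv_equiv track=rewrite | github.com/cbh66/advent-of-code | 2021/programs/21-b.py | next_quantum_move
-- ===== SOURCE A (Python) =====
-- BOARD_SIZE = 10
--
-- quantum_rolls = [
--     0,
--     0,
--     0,
--     1,
--     3,
--     6,
--     7,
--     6,
--     3,
--     1
-- ]
--
-- def next_quantum_move(player_scores):
--     num_wins = 0
--     new_player_scores = [[0] * 22 for _ in range(BOARD_SIZE)]
--     for current_space in range(len(player_scores)):
--         for roll in range(len(quantum_rolls)):
--             new_space = current_space + roll
--             new_space %= BOARD_SIZE
--             for current_score in range(len(player_scores[current_space])):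
--                 new_score = current_score + new_space + 1
--                 num_universes = player_scores[current_space][current_score] * quantum_rolls[roll]
--                 if new_score >= 21:
--                     num_wins += num_universes
--                 else:
--                     new_player_scores[new_space][new_score] += num_universes
--     return [num_wins, new_player_scores]
-- ===== SOURCE B (Python) =====
-- BOARD_SIZE = 10
--
-- quantum_rolls = [
--     0,
--     0,
--     0,
--     1,
--     3,
--     6,
--     7,
--     6,
--     3,
--     1
-- ]
--
-- def next_quantum_move(player_scores):
--     # Gather formulation: each destination cell (new_space, new_score) pulls its
--     # contributions directly; for a source space cs the unique roll reaching
--     # new_space is (new_space - cs) % BOARD_SIZE.  Wins are the weighted suffix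
--     # sums of each source row.
--     n = len(player_scores)
--     new_player_scores = [
--         [0 if new_score < new_space + 1 or new_score > 20 else
--          sum(quantum_rolls[(new_space - cs) % BOARD_SIZE]
--              * (player_scores[cs][new_score - new_space - 1]
--                 if new_score - new_space - 1 < len(player_scores[cs]) else 0)
--              for cs in range(n))
--          for new_score in range(22)]
--         for new_space in range(BOARD_SIZE)]
--     num_wins = sum(quantum_rolls[(new_space - cs) % BOARD_SIZE]
--                    * sum(player_scores[cs][20 - new_space:])
--                    for cs in range(n)
--                    for new_space in range(BOARD_SIZE))
--     return [num_wins, new_player_scores]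
-- ===== Notes on version B (the rewrite author's own statement) =====
-- stated objective: faster
-- what changed: Replaces A's scatter (push each source cell's universes out through every roll, mutating the destination table cell by cell) by a gather: each destination cell is computed directly as a closed sum over source spaces using the unique roll (new_space - cs) % 10, and wins are weighted suffix-slice sums of the source rows.
import Mathlib
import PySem

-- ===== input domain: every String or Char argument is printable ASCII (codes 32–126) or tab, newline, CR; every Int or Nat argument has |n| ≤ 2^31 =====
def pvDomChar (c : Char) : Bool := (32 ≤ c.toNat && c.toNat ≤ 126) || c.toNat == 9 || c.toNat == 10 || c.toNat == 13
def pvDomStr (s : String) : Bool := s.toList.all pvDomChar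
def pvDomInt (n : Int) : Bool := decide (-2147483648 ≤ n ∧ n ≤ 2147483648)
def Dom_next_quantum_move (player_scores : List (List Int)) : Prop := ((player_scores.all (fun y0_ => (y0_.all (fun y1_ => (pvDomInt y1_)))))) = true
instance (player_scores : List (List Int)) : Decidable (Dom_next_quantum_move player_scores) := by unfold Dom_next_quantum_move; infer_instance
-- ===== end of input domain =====

-- B replaces A's scatter update by a gather: each destination cell is a closed sum over
-- source spaces via the unique roll (new_space - cs) % 10, and wins are weighted suffix
-- sums of the source rows (alternative decomposition, same exact results).

-- ===== PORT A =====
def quantum_rolls : List Int := [0, 0, 0, 1, 3, 6, 7, 6, 3, 1]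

-- body of A's innermost 'for current_score in range(len(player_scores[current_space]))'
def pvScoreStep (row : List Int) (new_space roll : Int)
    (s : Int × List (List Int)) (current_score : Int) : Int × List (List Int) :=
  let new_score := current_score + new_space + 1
  let num_universes := PySem.List.pyGetD row current_score 0 * PySem.List.pyGetD quantum_rolls roll 0
  if 21 ≤ new_score then (s.1 + num_universes, s.2)
  else (s.1, PySem.List.pySetD s.2 new_space
        (PySem.List.pySetD (PySem.List.pyGetD s.2 new_space []) new_score
          (PySem.List.pyGetD (PySem.List.pyGetD s.2 new_space []) new_score 0 + num_universes)))

-- body of A's 'for roll in range(len(quantum_rolls))'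
def pvRollStep (player_scores : List (List Int)) (current_space : Int)
    (s : Int × List (List Int)) (roll : Int) : Int × List (List Int) :=
  let new_space := PySem.Int.mod (current_space + roll) 10
  let row := PySem.List.pyGetD player_scores current_space []
  (PySem.List.pyRange 0 (row.length : Int) 1).foldl (pvScoreStep row new_space roll) s

-- all indices into the table are in range by construction (new_space = _ % 10, new_score < 21),
-- so the pyGetD/pySetD total forms are exact here
def next_quantum_move (player_scores : List (List Int)) : Int × List (List Int) :=
  let init : Int × List (List Int) :=
    (0, (PySem.List.pyRange 0 10 1).map (fun _ => PySem.List.pyRepeat [(0 : Int)] 22))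
  (PySem.List.pyRange 0 (player_scores.length : Int) 1).foldl
    (fun s current_space =>
      (PySem.List.pyRange 0 (quantum_rolls.length : Int) 1).foldl
        (pvRollStep player_scores current_space) s)
    init

-- ===== PORT B =====
def next_quantum_move_alt (player_scores : List (List Int)) : Int × List (List Int) :=
  let n : Int := player_scores.length
  let new_player_scores :=
    (PySem.List.pyRange 0 10 1).map (fun new_space =>
      (PySem.List.pyRange 0 22 1).map (fun new_score =>
        if new_score < new_space + 1 ∨ 20 < new_score then (0 : Int)
        else ((PySem.List.pyRange 0 n 1).map (fun cs =>
          PySem.List.pyGetD quantum_rolls (PySem.Int.mod (new_space - cs) 10) 0 *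
          (if new_score - new_space - 1 < ((PySem.List.pyGetD player_scores cs []).length : Int)
           then PySem.List.pyGetD (PySem.List.pyGetD player_scores cs []) (new_score - new_space - 1) 0
           else 0))).sum))
  let num_wins :=
    ((PySem.List.pyRange 0 n 1).map (fun cs =>
      ((PySem.List.pyRange 0 10 1).map (fun new_space =>
        PySem.List.pyGetD quantum_rolls (PySem.Int.mod (new_space - cs) 10) 0 *
        (PySem.List.slice (PySem.List.pyGetD player_scores cs []) (some (20 - new_space)) none).sum)).sum)).sum
  (num_wins, new_player_scores)

-- ===== PRECONDITION & SPEC =====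
def Spec_next_quantum_move (player_scores : List (List Int)) (out : Int × List (List Int)) : Prop := out = next_quantum_move_alt player_scores
instance (player_scores : List (List Int)) (out : Int × List (List Int)) : Decidable (Spec_next_quantum_move player_scores out) := by unfold Spec_next_quantum_move; infer_instance

-- ===== CLAIM (what is proved, stated in full; the proofs are below) =====
def Claim_equal_next_quantum_move : Prop := ∀ (player_scores : List (List Int)), Dom_next_quantum_move player_scores → Spec_next_quantum_move player_scores (next_quantum_move player_scores)

-- ===== LEMMAS AND PROOFS =====

-- abbreviations used only by the proofs
def qrD (i : Int) : Int := PySem.List.pyGetD quantum_rolls i 0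
def gvalI (row : List Int) (d : Int) (ns : Nat) : Int :=
  if d + 1 ≤ (ns : Int) ∧ (ns : Int) ≤ 20 then row.getD (ns - d.toNat - 1) 0 else 0
def tailI (row : List Int) (d : Int) : Int := (row.drop (20 - d).toNat).sum
def addT (t u : List (List Int)) : List (List Int) := List.zipWith (List.zipWith (· + ·)) t u
def mkT (F : Nat → Nat → Int) : List (List Int) :=
  (List.range 10).map (fun d => (List.range 22).map (fun ns => F d ns))
def wghtN (cs d : Nat) : Int := qrD (PySem.Int.mod ((d : Int) - (cs : Int)) 10)
def rowOf (ps : List (List Int)) (cs : Nat) : List Int := ps.getD cs []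
def cellF (ps : List (List Int)) (m d ns : Nat) : Int :=
  ((List.range m).map (fun cs => wghtN cs d * gvalI (rowOf ps cs) (d : Int) ns)).sum
def winF (ps : List (List Int)) (m : Nat) : Int :=
  ((List.range m).map (fun cs =>
    ((List.range 10).map (fun d => wghtN cs d * tailI (rowOf ps cs) (d : Int))).sum)).sum

lemma zipAdd_assoc (a b c : List Int) :
    List.zipWith (· + ·) (List.zipWith (· + ·) a b) c
      = List.zipWith (· + ·) a (List.zipWith (· + ·) b c) := by
  induction a generalizing b c with
  | nil => simp
  | cons x a ih => cases b <;> cases c <;> simp [ih, add_assoc]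

lemma addT_assoc (a b c : List (List Int)) : addT (addT a b) c = addT a (addT b c) := by
  induction a generalizing b c with
  | nil => simp [addT]
  | cons x a ih =>
    cases b <;> cases c <;> simp [addT, zipAdd_assoc] <;> exact ih _ _

lemma addT_mk_mk (F G : Nat → Nat → Int) :
    addT (mkT F) (mkT G) = mkT (fun d ns => F d ns + G d ns) := by
  apply List.ext_getElem
  · simp [addT, mkT]
  · intro i h1 h2
    simp only [addT, mkT, List.getElem_zipWith, List.getElem_map]
    apply List.ext_getElem
    · simp
    · intro j j1 j2
      simp only [List.getElem_zipWith, List.getElem_map]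

lemma addT_mk_zero (t : List (List Int)) (ht : t.length = 10)
    (htr : ∀ r ∈ t, r.length = 22) :
    addT t (mkT (fun _ _ => 0)) = t := by
  apply List.ext_getElem
  · simp [addT, mkT, ht]
  · intro i h1 h2
    simp only [addT, mkT, List.getElem_zipWith, List.getElem_map]
    apply List.ext_getElem
    · simp [htr _ (t.getElem_mem h2)]
    · intro j j1 j2
      simp only [List.getElem_zipWith, List.getElem_map, add_zero]


lemma mkT_congr {F G : Nat → Nat → Int} (h : ∀ d < 10, ∀ ns < 22, F d ns = G d ns) :
    mkT F = mkT G := by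
  unfold mkT
  refine List.map_congr_left fun d hd => List.map_congr_left fun ns hns => ?_
  exact h d (List.mem_range.mp hd) ns (List.mem_range.mp hns)

lemma length_mkT (F : Nat → Nat → Int) : (mkT F).length = 10 := by simp [mkT]

lemma length_addT_mkT (t : List (List Int)) (F : Nat → Nat → Int) (ht : t.length = 10) :
    (addT t (mkT F)).length = 10 := by simp [addT, mkT, ht]

lemma rows_addT_mkT (t : List (List Int)) (F : Nat → Nat → Int)
    (htr : ∀ r ∈ t, r.length = 22) : ∀ r ∈ addT t (mkT F), r.length = 22 := by
  intro r hr
  rw [List.mem_iff_getElem] at hr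
  obtain ⟨i, hi, rfl⟩ := hr
  have hit : i < t.length := by simp [addT, mkT] at hi; omega
  simp only [addT, mkT, List.getElem_zipWith, List.getElem_map, List.length_zipWith,
    List.length_map, List.length_range]
  rw [htr _ (t.getElem_mem hit)]
  simp

lemma getD_set' (l : List Int) (i j : Nat) (v : Int) :
    (l.set i v).getD j 0 = if i = j ∧ i < l.length then v else l.getD j 0 := by
  by_cases hl : i < l.length
  · by_cases hij : i = j
    · subst hij
      simp [List.getD_eq_getElem?_getD, List.getElem?_set_self, hl]
    · simp [List.getD_eq_getElem?_getD, List.getElem?_set_ne hij, hij]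
  · rw [List.set_eq_of_length_le (by omega)]
    have hn : ¬(i = j ∧ i < l.length) := fun hh => hl hh.2
    rw [if_neg hn]

lemma getD_set2' (l : List (List Int)) (i j : Nat) (v : List Int) :
    (l.set i v).getD j [] = if i = j ∧ i < l.length then v else l.getD j [] := by
  by_cases hl : i < l.length
  · by_cases hij : i = j
    · subst hij
      simp [List.getD_eq_getElem?_getD, List.getElem?_set_self, hl]
    · simp [List.getD_eq_getElem?_getD, List.getElem?_set_ne hij, hij]
  · rw [List.set_eq_of_length_le (by omega)]
    have hn : ¬(i = j ∧ i < l.length) := fun hh => hl hh.2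
    rw [if_neg hn]

lemma getD_addT_mkT (t : List (List Int)) (F : Nat → Nat → Int) (ht : t.length = 10)
    (htr : ∀ r ∈ t, r.length = 22) (i j : Nat) (hi : i < 10) (hj : j < 22) :
    ((addT t (mkT F)).getD i []).getD j 0 = (t.getD i []).getD j 0 + F i j := by
  have hit : i < t.length := by omega
  have h1 : i < (addT t (mkT F)).length := by rw [length_addT_mkT t F ht]; exact hi
  rw [List.getD_eq_getElem _ _ h1]
  have hrl : t[i].length = 22 := htr _ (t.getElem_mem hit)
  simp only [addT, mkT, List.getElem_zipWith, List.getElem_map, List.getElem_range]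
  have hj2 : j < (List.zipWith (· + ·) t[i] ((List.range 22).map (fun ns => F i ns))).length := by
    simp [hrl]; omega
  rw [List.getD_eq_getElem _ _ hj2, List.getD_eq_getElem _ _ hit,
    List.getD_eq_getElem _ _ (by omega : j < t[i].length)]
  simp only [List.getElem_zipWith, List.getElem_map, List.getElem_range]

lemma tbl_ext (A B : List (List Int)) (hA : A.length = 10) (hB : B.length = 10)
    (hAr : ∀ r ∈ A, r.length = 22) (hBr : ∀ r ∈ B, r.length = 22)
    (h : ∀ i < 10, ∀ j < 22, (A.getD i []).getD j 0 = (B.getD i []).getD j 0) : A = B := by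
  apply List.ext_getElem (by omega)
  intro i h1 h2
  have hr1 : A[i].length = 22 := hAr _ (A.getElem_mem h1)
  have hr2 : B[i].length = 22 := hBr _ (B.getElem_mem h2)
  apply List.ext_getElem (by rw [hr1, hr2])
  intro j j1 j2
  have := h i (by omega) j (by omega)
  rwa [List.getD_eq_getElem _ _ h1, List.getD_eq_getElem _ _ h2,
    List.getD_eq_getElem _ _ j1, List.getD_eq_getElem _ _ j2] at this

lemma pyGetD_app_left (l : List Int) (x : Int) (sc : Int) (h0 : 0 ≤ sc)
    (h : sc < (l.length : Int)) :
    PySem.List.pyGetD (l ++ [x]) sc 0 = PySem.List.pyGetD l sc 0 := by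
  rw [PySem.List.pyGetD_eq_getElem _ 0 h0 (by simp; omega),
    PySem.List.pyGetD_eq_getElem _ 0 h0 (by omega)]
  exact List.getElem_append_left (by omega)

lemma getD_snoc_ne (l : List Int) (x : Int) (idx : Nat) (h : idx ≠ l.length) :
    (l ++ [x]).getD idx 0 = l.getD idx 0 := by
  by_cases hlt : idx < l.length
  · exact List.getD_append _ _ _ _ hlt
  · rw [List.getD_eq_default _ _ (by simp; omega), List.getD_eq_default _ _ (by omega)]

lemma getD_snoc_self (l : List Int) (x : Int) : (l ++ [x]).getD l.length 0 = x := by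
  simp [List.getD_eq_getElem?_getD]

lemma gvalI_snoc (row' : List Int) (x : Int) (d : Int) (ns : Nat)
    (h : d + 1 ≤ (ns : Int) → (ns : Int) ≤ 20 → ns - d.toNat - 1 ≠ row'.length) :
    gvalI (row' ++ [x]) d ns = gvalI row' d ns := by
  unfold gvalI
  split_ifs with hc
  · exact getD_snoc_ne _ _ _ (h hc.1 hc.2)
  · rfl

-- single-hit sum
lemma sum_map_single_hit (l : List Int) (r0 c : Int) (hn : l.Nodup) (hm : r0 ∈ l) :
    (l.map (fun x => if x = r0 then c else 0)).sum = c := by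
  induction l with
  | nil => simp at hm
  | cons x l ih =>
    rw [List.nodup_cons] at hn
    rcases List.mem_cons.mp hm with h | h
    · subst h
      have hz : ∀ y ∈ l, (if y = r0 then c else 0) = 0 := by
        intro y hy
        rw [if_neg]
        rintro rfl
        exact hn.1 hy
      simp only [List.map_cons, List.sum_cons, if_pos rfl]
      rw [List.map_congr_left hz]
      simp
    · have hx : x ≠ r0 := by rintro rfl; exact hn.1 h
      simp only [List.map_cons, List.sum_cons, if_neg hx, zero_add]
      exact ih hn.2 h

-- the inner score loop adds w·(suffix sum) to wins and a one-row delta to the table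
lemma inner_loop (row : List Int) (d roll wins : Int) (hd0 : 0 ≤ d) (hd : d < 10)
    (t : List (List Int)) (ht : t.length = 10) (htr : ∀ r ∈ t, r.length = 22) :
    (PySem.List.pyRange 0 (row.length : Int) 1).foldl (pvScoreStep row d roll) (wins, t)
      = (wins + qrD roll * tailI row d,
         addT t (mkT (fun d' ns => if (d' : Int) = d then qrD roll * gvalI row d ns else 0))) := by
  have hd' : ((d.toNat : Int)) = d := Int.toNat_of_nonneg hd0
  induction row using List.reverseRecOn generalizing wins t with
  | nil =>
    rw [PySem.List.pyRange_one_eq_nil (by norm_num), List.foldl_nil]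
    rw [mkT_congr (G := fun _ _ => 0) (by intro d' _ ns _; simp [gvalI]),
      addT_mk_zero t ht htr]
    simp [tailI]
  | append_singleton row' x ih =>
    have hlen : (((row' ++ [x]).length : Int)) = (row'.length : Int) + 1 := by
      simp
    rw [hlen, PySem.List.pyRange_one_succ_right (by positivity), List.foldl_append]
    have hcg : ∀ (acc : Int × List (List Int)), ∀ sc ∈ PySem.List.pyRange 0 (row'.length : Int) 1,
        pvScoreStep (row' ++ [x]) d roll acc sc = pvScoreStep row' d roll acc sc := by
      intro acc sc hsc
      rw [PySem.List.mem_pyRange_one] at hsc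
      unfold pvScoreStep
      rw [pyGetD_app_left row' x sc hsc.1 hsc.2]
    rw [PySem.List.foldl_congr_mem _ _ _ _ hcg]
    rw [ih wins t ht htr]
    rw [List.foldl_cons, List.foldl_nil]
    have hx : PySem.List.pyGetD (row' ++ [x]) ((row'.length : Int)) 0 = x := by
      rw [PySem.List.pyGetD_natCast]
      exact getD_snoc_self row' x
    show pvScoreStep (row' ++ [x]) d roll _ _ = _
    unfold pvScoreStep
    simp only [hx]
    by_cases hwin : (21 : Int) ≤ (row'.length : Int) + d + 1
    · rw [if_pos hwin]
      have hk : (20 - d).toNat ≤ row'.length := by omega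
      have htail : tailI (row' ++ [x]) d = tailI row' d + x := by
        unfold tailI
        rw [List.drop_append_of_le_length hk]
        simp
      have htab : (mkT fun d' ns => if (d' : Int) = d then qrD roll * gvalI (row' ++ [x]) d ns else 0)
          = (mkT fun d' ns => if (d' : Int) = d then qrD roll * gvalI row' d ns else 0) := by
        refine mkT_congr (fun d' _ ns hns => ?_)
        rw [gvalI_snoc row' x d ns (by intro h1 h2; omega)]
      rw [htail, htab]
      show (wins + qrD roll * tailI row' d + x * PySem.List.pyGetD quantum_rolls roll 0, _) = _
      have : PySem.List.pyGetD quantum_rolls roll 0 = qrD roll := rfl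
      rw [this]
      refine Prod.ext ?_ rfl
      show wins + qrD roll * tailI row' d + x * qrD roll = wins + qrD roll * (tailI row' d + x)
      ring
    · rw [if_neg hwin]
      have hns0 : (0 : Int) ≤ (row'.length : Int) + d + 1 := by omega
      have hnsN : ((row'.length : Int) + d + 1).toNat = row'.length + d.toNat + 1 := by omega
      have hns20 : row'.length + d.toNat + 1 ≤ 20 := by omega
      set T' := addT t (mkT fun d' ns => if (d' : Int) = d then qrD roll * gvalI row' d ns else 0) with hT'
      have hT'len : T'.length = 10 := length_addT_mkT _ _ ht
      have hT'rows : ∀ r ∈ T', r.length = 22 := rows_addT_mkT _ _ htr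
      have hrowD : PySem.List.pyGetD T' d [] = T'.getD d.toNat [] := by
        rw [PySem.List.pyGetD_eq_getElem _ [] hd0 (by rw [hT'len]; omega),
          List.getD_eq_getElem _ _ (by omega)]
      have hrowDlen : (T'.getD d.toNat []).length = 22 := by
        rw [List.getD_eq_getElem _ _ (by omega : d.toNat < T'.length)]
        exact hT'rows _ (T'.getElem_mem _)
      have hcell : PySem.List.pyGetD (T'.getD d.toNat [])
          ((row'.length : Int) + d + 1) 0
          = (T'.getD d.toNat []).getD (row'.length + d.toNat + 1) 0 := by
        rw [PySem.List.pyGetD_eq_getElem _ 0 hns0 (by rw [hrowDlen]; omega)]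
        simp only [hnsN]
        exact (List.getD_eq_getElem _ _ (by omega)).symm
      rw [PySem.List.pySetD_of_nonneg _ _ hd0, hrowD,
        PySem.List.pySetD_of_nonneg _ _ hns0, hnsN, hcell]
      refine Prod.ext ?_ ?_
      · show wins + qrD roll * tailI row' d = wins + qrD roll * tailI (row' ++ [x]) d
        have : tailI (row' ++ [x]) d = tailI row' d := by
          unfold tailI
          rw [List.drop_eq_nil_of_le (by simp; omega), List.drop_eq_nil_of_le (by omega)]
        rw [this]
      · show T'.set d.toNat ((T'.getD d.toNat []).set (row'.length + d.toNat + 1)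
            ((T'.getD d.toNat []).getD (row'.length + d.toNat + 1) 0
              + x * PySem.List.pyGetD quantum_rolls roll 0)) = _
        have hq : PySem.List.pyGetD quantum_rolls roll 0 = qrD roll := rfl
        rw [hq]
        refine tbl_ext _ _ (by rw [List.length_set]; exact hT'len)
          (length_addT_mkT _ _ ht) ?_ ?_ ?_
        · intro r hr
          rcases List.mem_or_eq_of_mem_set hr with h | h
          · exact hT'rows _ h
          · rw [h, List.length_set]
            exact hrowDlen
        · exact rows_addT_mkT _ _ htr
        · intro i hi j hj
          rw [getD_set2', getD_addT_mkT t _ ht htr i j hi hj]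
          by_cases hik : d.toNat = i
          · rw [if_pos ⟨hik, by omega⟩, getD_set']
            subst hik
            by_cases hjk : row'.length + d.toNat + 1 = j
            · subst hjk
              rw [if_pos ⟨rfl, by omega⟩]
              rw [hT', getD_addT_mkT t _ ht htr _ _ (by omega) (by omega)]
              have hidx : row'.length + d.toNat + 1 - d.toNat - 1 = row'.length := by omega
              have h1 : gvalI row' d (row'.length + d.toNat + 1) = 0 := by
                unfold gvalI
                rw [if_pos ⟨by push_cast; omega, by push_cast; omega⟩, hidx]
                exact List.getD_eq_default _ _ (le_refl _)
              have h2 : gvalI (row' ++ [x]) d (row'.length + d.toNat + 1) = x := by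
                unfold gvalI
                rw [if_pos ⟨by push_cast; omega, by push_cast; omega⟩, hidx]
                exact getD_snoc_self row' x
              rw [if_pos hd', if_pos hd', h1, h2]
              ring
            · rw [if_neg (fun hc => hjk hc.1)]
              rw [hT', getD_addT_mkT t _ ht htr _ _ (by omega) hj]
              congr 1
              rw [if_pos hd', if_pos hd']
              congr 1
              exact (gvalI_snoc row' x d j (by intro h1 h2; omega)).symm
          · rw [if_neg (fun hc => hik hc.1)]
            rw [hT', getD_addT_mkT t _ ht htr i j hi hj]
            congr 1
            have hdd : ¬((i : Int)) = d := by omega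
            rw [if_neg hdd, if_neg hdd]


-- the roll loop over any list of rolls R ⊆ [0,10)
lemma roll_loop (ps : List (List Int)) (cs : Int) (hcs : 0 ≤ cs) (R : List Int)
    (hR : ∀ r ∈ R, 0 ≤ r ∧ r < 10) (wins : Int) (t : List (List Int))
    (ht : t.length = 10) (htr : ∀ r ∈ t, r.length = 22) :
    R.foldl (pvRollStep ps cs) (wins, t)
      = (wins + (R.map (fun roll =>
            qrD roll * tailI (PySem.List.pyGetD ps cs []) (PySem.Int.mod (cs + roll) 10))).sum,
         addT t (mkT (fun d' ns => (R.map (fun roll =>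
            if (d' : Int) = PySem.Int.mod (cs + roll) 10
            then qrD roll * gvalI (PySem.List.pyGetD ps cs []) (d' : Int) ns else 0)).sum))) := by
  induction R using List.reverseRecOn with
  | nil =>
    rw [List.foldl_nil]
    rw [mkT_congr (G := fun _ _ => 0) (by intro d' _ ns _; simp), addT_mk_zero t ht htr]
    simp
  | append_singleton R r ihR =>
    rw [List.foldl_append, ihR (fun r' hr' => hR r' (by simp [hr']))]
    rw [List.foldl_cons, List.foldl_nil]
    have hr := hR r (by simp)
    show pvRollStep ps cs _ r = _
    unfold pvRollStep
    have hd0 : (0 : Int) ≤ PySem.Int.mod (cs + r) 10 := PySem.Int.mod_nonneg _ (by norm_num)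
    have hd10 : PySem.Int.mod (cs + r) 10 < 10 := PySem.Int.mod_lt _ (by norm_num)
    rw [inner_loop (PySem.List.pyGetD ps cs []) (PySem.Int.mod (cs + r) 10) r _ hd0 hd10 _
      (length_addT_mkT _ _ ht) (rows_addT_mkT _ _ htr)]
    rw [addT_assoc, addT_mk_mk]
    refine Prod.ext ?_ ?_
    · show _ + _ + _ = _ + _
      rw [List.map_append, List.sum_append]
      simp [add_assoc]
    · show addT t _ = addT t _
      refine congrArg (addT t) (mkT_congr fun d' _ ns _ => ?_)
      rw [List.map_append, List.sum_append]
      simp only [List.map_cons, List.map_nil, List.sum_cons, List.sum_nil, add_zero]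
      congr 1
      by_cases hdd : ((d' : Int)) = PySem.Int.mod (cs + r) 10
      · rw [if_pos hdd, if_pos hdd, hdd]
      · rw [if_neg hdd, if_neg hdd]

lemma rows_mkT (F : Nat → Nat → Int) : ∀ r ∈ mkT F, r.length = 22 := by
  intro r hr
  simp only [mkT, List.mem_map] at hr
  obtain ⟨d, _, rfl⟩ := hr
  simp

lemma mod_roundtrip (cs roll : Int) (h0 : 0 ≤ roll) (h1 : roll < 10) :
    PySem.Int.mod (PySem.Int.mod (cs + roll) 10 - cs) 10 = roll := by
  rw [PySem.Int.mod_eq_emod_of_pos (by norm_num), PySem.Int.mod_eq_emod_of_pos (by norm_num)]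
  omega

lemma reindex (cs : Nat) (F : Int → Int) :
    ((PySem.List.pyRange 0 10 1).map (fun roll =>
        qrD roll * F (PySem.Int.mod ((cs : Int) + roll) 10))).sum
      = ((List.range 10).map (fun dd => wghtN cs dd * F (dd : Int))).sum := by
  have hkey : ∀ roll ∈ PySem.List.pyRange 0 10 1,
      qrD roll * F (PySem.Int.mod ((cs : Int) + roll) 10)
        = (fun dd => qrD (PySem.Int.mod (dd - (cs : Int)) 10) * F dd)
            (PySem.Int.mod ((cs : Int) + roll) 10) := by
    intro roll hroll
    rw [PySem.List.mem_pyRange_one] at hroll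
    simp only
    rw [mod_roundtrip _ _ hroll.1 hroll.2]
  rw [List.map_congr_left hkey]
  have hmm : (PySem.List.pyRange 0 10 1).map (fun a =>
      (fun dd => qrD (PySem.Int.mod (dd - (cs : Int)) 10) * F dd) (PySem.Int.mod ((cs : Int) + a) 10))
      = ((PySem.List.pyRange 0 10 1).map (fun a => PySem.Int.mod ((cs : Int) + a) 10)).map
          (fun dd => qrD (PySem.Int.mod (dd - (cs : Int)) 10) * F dd) := by
    rw [List.map_map]
    rfl
  rw [hmm]
  have hperm : ((PySem.List.pyRange 0 10 1).map
      (fun roll => PySem.Int.mod ((cs : Int) + roll) 10)).Perm (PySem.List.pyRange 0 10 1) := by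
    refine List.Subperm.perm_of_length_le (List.subperm_of_subset ?_ ?_) (by simp)
    · refine List.Nodup.map_on ?_ (PySem.List.nodup_pyRange_one _ _)
      intro a ha b hb he
      rw [PySem.List.mem_pyRange_one] at ha hb
      rw [PySem.Int.mod_eq_emod_of_pos (by norm_num),
        PySem.Int.mod_eq_emod_of_pos (by norm_num)] at he
      omega
    · intro y hy
      obtain ⟨roll, _, rfl⟩ := List.mem_map.mp hy
      rw [PySem.List.mem_pyRange_one]
      exact ⟨PySem.Int.mod_nonneg _ (by norm_num), PySem.Int.mod_lt _ (by norm_num)⟩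
  rw [List.Perm.sum_eq (hperm.map _)]
  have h10 : (10 : Int) = ((10 : Nat) : Int) := by norm_num
  rw [h10, PySem.List.pyRange_zero_nat, List.map_map]
  rfl

lemma sum_indicator_mod (cs : Int) (d' : Nat) (hd' : d' < 10) (v : Int → Int) :
    ((PySem.List.pyRange 0 10 1).map (fun roll =>
        if (d' : Int) = PySem.Int.mod (cs + roll) 10 then v roll else 0)).sum
      = v (PySem.Int.mod ((d' : Int) - cs) 10) := by
  have h0 : (0 : Int) ≤ PySem.Int.mod ((d' : Int) - cs) 10 := PySem.Int.mod_nonneg _ (by norm_num)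
  have h1 : PySem.Int.mod ((d' : Int) - cs) 10 < 10 := PySem.Int.mod_lt _ (by norm_num)
  have hkey : ∀ roll ∈ PySem.List.pyRange 0 10 1,
      (if (d' : Int) = PySem.Int.mod (cs + roll) 10 then v roll else 0)
        = (if roll = PySem.Int.mod ((d' : Int) - cs) 10
           then v (PySem.Int.mod ((d' : Int) - cs) 10) else 0) := by
    intro roll hroll
    rw [PySem.List.mem_pyRange_one] at hroll
    by_cases he : roll = PySem.Int.mod ((d' : Int) - cs) 10
    · rw [if_pos ?_, if_pos he, he]
      rw [he, PySem.Int.mod_eq_emod_of_pos (by norm_num),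
        PySem.Int.mod_eq_emod_of_pos (by norm_num)]
      omega
    · rw [if_neg ?_, if_neg he]
      intro hc
      apply he
      rw [PySem.Int.mod_eq_emod_of_pos (by norm_num)] at hc ⊢
      omega
  rw [List.map_congr_left hkey]
  exact sum_map_single_hit _ _ _ (PySem.List.nodup_pyRange_one _ _)
    (PySem.List.mem_pyRange_one.mpr ⟨h0, h1⟩)

lemma A_characterization (ps : List (List Int)) :
    next_quantum_move ps = (winF ps ps.length, mkT (cellF ps ps.length)) := by
  unfold next_quantum_move
  have hql : ((quantum_rolls.length : Int)) = 10 := by norm_num [quantum_rolls]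
  simp only [hql]
  rw [PySem.List.pyRange_zero_nat, List.foldl_map]
  have h1 : ∀ ps : List (List Int), winF ps 0 = 0 := by intro ps; simp [winF]
  have h2 : mkT (cellF ps 0) = mkT (fun _ _ => 0) :=
    mkT_congr (by intro d _ ns _; simp [cellF])
  have hinit : ((0 : Int), (PySem.List.pyRange 0 10 1).map
        (fun _ => PySem.List.pyRepeat [(0 : Int)] 22)) = (winF ps 0, mkT (cellF ps 0)) := by
    rw [h1, h2]
    decide
  suffices h : ∀ m : Nat, (List.range m).foldl
      (fun (s : Int × List (List Int)) (k : Nat) =>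
        (PySem.List.pyRange 0 10 1).foldl (pvRollStep ps (k : Int)) s)
      ((0 : Int), (PySem.List.pyRange 0 10 1).map (fun _ => PySem.List.pyRepeat [(0 : Int)] 22))
      = (winF ps m, mkT (cellF ps m)) from h ps.length
  intro m
  induction m with
  | zero => simpa using hinit
  | succ m ihm =>
    rw [List.range_succ, List.foldl_append, ihm]
    simp only [List.foldl_cons, List.foldl_nil]
    rw [roll_loop ps (m : Int) (by positivity) _
      (fun r hr => by rw [PySem.List.mem_pyRange_one] at hr; exact hr)
      _ _ (length_mkT _) (rows_mkT _)]
    refine Prod.ext ?_ ?_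
    · show winF ps m + _ = winF ps (m + 1)
      rw [reindex m (fun dd => tailI (PySem.List.pyGetD ps (m : Int) []) dd)]
      unfold winF
      rw [show List.range (m + 1) = List.range m ++ [m] from List.range_succ,
        List.map_append, List.sum_append]
      simp only [List.map_cons, List.map_nil, List.sum_cons, List.sum_nil, add_zero]
      congr 2
      refine List.map_congr_left (fun dd _ => ?_)
      rw [PySem.List.pyGetD_natCast]
      rfl
    · show addT (mkT (cellF ps m)) _ = mkT (cellF ps (m + 1))
      rw [addT_mk_mk]
      refine mkT_congr fun d' hd' ns _ => ?_
      rw [sum_indicator_mod (m : Int) d' hd'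
        (fun roll => qrD roll * gvalI (PySem.List.pyGetD ps (m : Int) []) (d' : Int) ns)]
      unfold cellF
      rw [show List.range (m + 1) = List.range m ++ [m] from List.range_succ,
        List.map_append, List.sum_append]
      simp only [List.map_cons, List.map_nil, List.sum_cons, List.sum_nil, add_zero]
      congr 1
      rw [PySem.List.pyGetD_natCast]
      rfl

lemma B_characterization (ps : List (List Int)) :
    next_quantum_move_alt ps = (winF ps ps.length, mkT (cellF ps ps.length)) := by
  have h10 : PySem.List.pyRange 0 10 1 = (List.range 10).map (fun (k : Nat) => (k : Int)) := by
    decide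
  have h22 : PySem.List.pyRange 0 22 1 = (List.range 22).map (fun (k : Nat) => (k : Int)) := by
    decide
  have hwins : (((PySem.List.pyRange 0 ((ps.length : Int)) 1).map (fun cs =>
      ((PySem.List.pyRange 0 10 1).map (fun new_space =>
        PySem.List.pyGetD quantum_rolls (PySem.Int.mod (new_space - cs) 10) 0 *
        (PySem.List.slice (PySem.List.pyGetD ps cs []) (some (20 - new_space)) none).sum)).sum)).sum)
      = winF ps ps.length := by
    rw [PySem.List.pyRange_zero_nat, List.map_map]
    unfold winF
    refine congrArg List.sum (List.map_congr_left fun cs _ => ?_)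
    show ((PySem.List.pyRange 0 10 1).map _).sum = _
    rw [h10, List.map_map]
    refine congrArg List.sum (List.map_congr_left fun d hd => ?_)
    rw [List.mem_range] at hd
    show PySem.List.pyGetD quantum_rolls (PySem.Int.mod ((d : Int) - (cs : Int)) 10) 0 *
        (PySem.List.slice (PySem.List.pyGetD ps (cs : Int) []) (some (20 - (d : Int))) none).sum
      = wghtN cs d * tailI (rowOf ps cs) (d : Int)
    rw [PySem.List.pyGetD_natCast]
    rw [PySem.List.slice_from _ (by push_cast; omega)]
    rfl
  have htbl : ((PySem.List.pyRange 0 10 1).map (fun new_space =>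
      (PySem.List.pyRange 0 22 1).map (fun new_score =>
        if new_score < new_space + 1 ∨ 20 < new_score then (0 : Int)
        else ((PySem.List.pyRange 0 ((ps.length : Int)) 1).map (fun cs =>
          PySem.List.pyGetD quantum_rolls (PySem.Int.mod (new_space - cs) 10) 0 *
          (if new_score - new_space - 1 < ((PySem.List.pyGetD ps cs []).length : Int)
           then PySem.List.pyGetD (PySem.List.pyGetD ps cs []) (new_score - new_space - 1) 0
           else 0))).sum)))
      = mkT (cellF ps ps.length) := by
    rw [h10, h22, List.map_map]
    unfold mkT
    refine List.map_congr_left fun d hd => ?_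
    rw [List.mem_range] at hd
    simp only [Function.comp_apply]
    rw [List.map_map]
    refine List.map_congr_left fun ns hns => ?_
    rw [List.mem_range] at hns
    simp only [Function.comp_apply]
    show (if ((ns : Int)) < (d : Int) + 1 ∨ 20 < ((ns : Int)) then (0 : Int) else _)
      = cellF ps ps.length d ns
    by_cases hbad : ((ns : Int)) < (d : Int) + 1 ∨ 20 < ((ns : Int))
    · rw [if_pos hbad]
      unfold cellF
      symm
      apply List.sum_eq_zero
      intro y hy
      obtain ⟨cs, _, rfl⟩ := List.mem_map.mp hy
      unfold gvalI
      rw [if_neg (by push_cast at hbad ⊢; omega)]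
      exact mul_zero _
    · rw [if_neg hbad]
      rw [PySem.List.pyRange_zero_nat, List.map_map]
      unfold cellF
      refine congrArg List.sum (List.map_congr_left fun cs _ => ?_)
      show PySem.List.pyGetD quantum_rolls (PySem.Int.mod ((d : Int) - (cs : Int)) 10) 0 *
          (if ((ns : Int)) - (d : Int) - 1 < ((PySem.List.pyGetD ps (cs : Int) []).length : Int)
           then PySem.List.pyGetD (PySem.List.pyGetD ps (cs : Int) []) (((ns : Int)) - (d : Int) - 1) 0
           else 0)
        = wghtN cs d * gvalI (rowOf ps cs) (d : Int) ns
      simp only [PySem.List.pyGetD_natCast ps cs ([] : List Int)]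
      have hcond : ((d : Int)) + 1 ≤ ((ns : Int)) ∧ ((ns : Int)) ≤ 20 := by
        push_cast at hbad; omega
      have hidx : (((ns : Int)) - (d : Int) - 1).toNat = ns - d - 1 := by omega
      have hd2 : (((d : Nat) : Int)).toNat = d := by simp
      have hval : (if ((ns : Int)) - (d : Int) - 1 < ((ps.getD cs []).length : Int)
           then PySem.List.pyGetD (ps.getD cs []) (((ns : Int)) - (d : Int) - 1) 0
           else 0) = gvalI (rowOf ps cs) ((d : Nat) : Int) ns := by
        unfold gvalI rowOf
        rw [if_pos hcond]
        by_cases hlt : ((ns : Int)) - (d : Int) - 1 < ((ps.getD cs []).length : Int)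
        · rw [if_pos hlt]
          rw [PySem.List.pyGetD_eq_getElem _ 0 (by omega) hlt]
          simp only [hidx, hd2]
          exact (List.getD_eq_getElem _ _ (by omega)).symm
        · rw [if_neg hlt]
          simp only [hd2]
          exact (List.getD_eq_default _ _ (by omega)).symm
      rw [hval]
      rfl
  exact Prod.ext hwins htbl

-- ===== VERDICT (by name: the statement is the Claim_ definition above) =====
theorem next_quantum_move_spec : Claim_equal_next_quantum_move := by
  intro ps _
  show next_quantum_move ps = next_quantum_move_alt ps
  rw [A_characterization, B_characterization]
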